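-- pv_equiv track=rewrite | github.com/mr-raccoon-dev/rugbystat_v2 | rugbystat/utils/parsers.py | _mark_columns
-- ===== SOURCE A (Python) =====
-- def _mark_columns(line):
--     previous_idx = -100
--     bounds = []
--     for idx, letter in enumerate(line):
--         if letter == ' ':
--             if previous_idx + 1 == idx:
--                 # consecutive whitespace found
--                 if bounds and bounds[-1] == previous_idx:
--                     bounds[-1] += 1
--                 else:
--                     bounds.append(idx)
--             previous_idx = idx
--     return bounds
-- ===== SOURCE B (Python) =====
-- def _mark_columns(line):
--     bounds = []
--     i = 0
--     n = len(line)
--     while i < n: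
--         if line[i] == ' ':
--             j = i
--             while j < n and line[j] == ' ':
--                 j += 1
--             if j - i >= 2:
--                 bounds.append(j - 1)
--             i = j
--         else:
--             i += 1
--     return bounds
-- ===== Notes on version B (the rewrite author's own statement) =====
-- stated objective: simpler
-- what changed: Replaced the per-character previous_idx/bounds[-1] mutation state machine with a run-skipping scan that finds each maximal run of spaces and emits the index of its last space when the run has length >= 2.
import Mathlib
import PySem

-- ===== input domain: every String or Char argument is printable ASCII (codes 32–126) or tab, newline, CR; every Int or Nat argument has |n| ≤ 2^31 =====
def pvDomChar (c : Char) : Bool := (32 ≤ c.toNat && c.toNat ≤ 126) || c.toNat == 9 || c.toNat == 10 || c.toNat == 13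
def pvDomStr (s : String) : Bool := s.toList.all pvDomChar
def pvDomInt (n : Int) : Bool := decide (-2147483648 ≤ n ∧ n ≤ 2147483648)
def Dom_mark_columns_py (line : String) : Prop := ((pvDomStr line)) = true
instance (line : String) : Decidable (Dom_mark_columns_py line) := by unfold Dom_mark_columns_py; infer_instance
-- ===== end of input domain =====

-- B replaces A's per-character previous_idx/bounds[-1] state machine by a run-skipping
-- scan emitting the last index of each run of >= 2 spaces (objective: simpler).


-- ===== PORT A =====
-- bounds is kept reversed (head = Python's bounds[-1]); the final reverse restores order.
def markStep (st : Int × List Int) (p : Int × Char) : Int × List Int :=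
  if p.2 = ' ' then
    if st.1 + 1 = p.1 then
      match st.2 with
      | b :: rs => if b = st.1 then (p.1, (b + 1) :: rs) else (p.1, p.1 :: b :: rs)
      | [] => (p.1, [p.1])
    else (p.1, st.2)
  else st

def mark_columns_py (line : String) : List Int :=
  (((PySem.List.enumerate line.toList 0).foldl markStep (-100, [])).2).reverse

-- ===== PORT B =====
def spanSp (cs : List Char) : Nat := (cs.takeWhile (· = ' ')).length

-- run-skipping scan: at a space, measure the run, emit its last index if length ≥ 2
def altGo (cs : List Char) (i : Nat) : List Int :=
  match cs with
  | [] => []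
  | c :: rest =>
    if c = ' ' then
      let k := spanSp rest
      let out := altGo (rest.drop k) (i + 1 + k)
      if 1 ≤ k then ((i : Int) + k) :: out else out
    else altGo rest (i + 1)
termination_by cs.length
decreasing_by
  · simp only [List.length_drop, List.length_cons]; omega
  · simp only [List.length_cons]; omega

def mark_columns_py_alt (line : String) : List Int := altGo line.toList 0

-- ===== PRECONDITION & SPEC =====
def Spec_mark_columns_py (line : String) (out : List Int) : Prop := out = mark_columns_py_alt line
instance (line : String) (out : List Int) : Decidable (Spec_mark_columns_py line out) := by unfold Spec_mark_columns_py; infer_instance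

-- ===== CLAIM (what is proved, stated in full; the proofs are below) =====
def Claim_equal_mark_columns_py : Prop := ∀ (line : String), Dom_mark_columns_py line → Spec_mark_columns_py line (mark_columns_py line)

-- ===== LEMMAS AND PROOFS =====

-- A's loop as a structural recursion on the remaining characters
def goA (cs : List Char) (i : Int) (prev : Int) (rb : List Int) : List Int :=
  match cs with
  | [] => rb
  | c :: rest =>
    if c = ' ' then
      if prev + 1 = i then
        match rb with
        | b :: rs => if b = prev then goA rest (i + 1) i ((b + 1) :: rs) else goA rest (i + 1) i (i :: b :: rs)
        | [] => goA rest (i + 1) i [i]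
      else goA rest (i + 1) i rb
    else goA rest (i + 1) prev rb

theorem goA_cons (c : Char) (rest : List Char) (i prev : Int) (rb : List Int) :
    goA (c :: rest) i prev rb =
      if c = ' ' then
        if prev + 1 = i then
          (match rb with
           | b :: rs => if b = prev then goA rest (i + 1) i ((b + 1) :: rs) else goA rest (i + 1) i (i :: b :: rs)
           | [] => goA rest (i + 1) i [i])
        else goA rest (i + 1) i rb
      else goA rest (i + 1) prev rb := by
  rw [goA.eq_def]

theorem if_space {al : Type} (a b : al) : (if (' ' : Char) = ' ' then a else b) = a := if_pos rfl

theorem foldl_eq_goA (cs : List Char) : ∀ (i prev : Int) (rb : List Int),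
    ((PySem.List.enumerate cs i).foldl markStep (prev, rb)).2 = goA cs i prev rb := by
  induction cs with
  | nil => intro i prev rb; simp [PySem.List.enumerate_nil, goA]
  | cons c rest ih =>
    intro i prev rb
    rw [PySem.List.enumerate_cons]
    simp only [List.foldl_cons, goA_cons, markStep]
    by_cases hc : c = ' '
    · subst hc
      rw [if_space, if_space]
      by_cases hp : prev + 1 = i
      · rw [if_pos hp, if_pos hp]
        cases rb with
        | nil => exact ih (i + 1) i [i]
        | cons b rs =>
          by_cases hb : b = prev
          · simp only [if_pos hb]; exact ih (i + 1) i ((b + 1) :: rs)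
          · simp only [if_neg hb]; exact ih (i + 1) i (i :: b :: rs)
      · rw [if_neg hp, if_neg hp]; exact ih (i + 1) i rb
    · rw [if_neg hc, if_neg hc]; exact ih (i + 1) prev rb

-- B's scan restarted "just after a single space" (state S1 of A's machine)
def runCont (cs : List Char) (i : Nat) : List Int :=
  let k := spanSp cs
  if 1 ≤ k then ((i : Int) + k - 1) :: altGo (cs.drop k) (i + k) else altGo cs i

theorem spanSp_cons_space (rest : List Char) : spanSp (' ' :: rest) = spanSp rest + 1 := by
  simp [spanSp, List.takeWhile]

theorem spanSp_cons_nonspace (c : Char) (rest : List Char) (hc : ¬ c = ' ') :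
    spanSp (c :: rest) = 0 := by
  simp [spanSp, List.takeWhile, hc]

theorem altGo_cons_nonspace (c : Char) (rest : List Char) (i : Nat) (hc : ¬ c = ' ') :
    altGo (c :: rest) i = altGo rest (i + 1) := by
  rw [altGo]; simp [hc]

theorem altGo_cons_space (rest : List Char) (i : Nat) :
    altGo (' ' :: rest) i =
      if 1 ≤ spanSp rest then ((i : Int) + spanSp rest) :: altGo (rest.drop (spanSp rest)) (i + 1 + spanSp rest)
      else altGo rest (i + 1) := by
  rw [altGo]
  rw [if_space]
  by_cases hk : 1 ≤ spanSp rest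
  · simp [hk]
  · have h0 : spanSp rest = 0 := by omega
    simp [h0]

theorem goA_cons_space_run_cons (rest : List Char) (i prev b : Int) (rs : List Int) :
    goA (' ' :: rest) i prev (b :: rs) =
      if prev + 1 = i then
        (if b = prev then goA rest (i + 1) i ((b + 1) :: rs) else goA rest (i + 1) i (i :: b :: rs))
      else goA rest (i + 1) i (b :: rs) := by
  rw [goA_cons, if_space]

-- the three reachable loop states of A, related to B's run-based scan simultaneously
theorem goA_main (cs : List Char) : ∀ (i : Nat) (rb : List Int),
    ((∀ b ∈ rb, b < (i : Int)) → ∀ prev : Int, prev + 1 < (i : Int) →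
        goA cs i prev rb = (altGo cs i).reverse ++ rb)
    ∧ ((∀ b ∈ rb, b < (i : Int) - 1) →
        goA cs i ((i : Int) - 1) rb = (runCont cs i).reverse ++ rb)
    ∧ ((∀ b ∈ rb, b < (i : Int) - 1) →
        goA cs i ((i : Int) - 1) (((i : Int) - 1) :: rb)
          = (altGo (cs.drop (spanSp cs)) (i + spanSp cs)).reverse ++ (((i : Int) - 1 + (spanSp cs : Int)) :: rb)) := by
  induction cs with
  | nil =>
    intro i rb
    refine ⟨fun _ _ _ => by simp [goA, altGo], fun _ => by simp [goA, runCont, spanSp, altGo], fun _ => by simp [goA, spanSp, altGo]⟩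
  | cons c rest ih =>
    intro i rb
    by_cases hc : c = ' '
    · subst hc
      refine ⟨?_, ?_, ?_⟩
      · -- S0: prev + 1 < i, current char is a space: move to S1
        intro hrb prev hprev
        rw [goA_cons, if_space, if_neg (by omega : ¬ prev + 1 = (i : Int))]
        have h2 := ((ih (i + 1) rb).2.1) (by intro b hb; have := hrb b hb; push_cast; omega)
        push_cast at h2
        have e2 : (i : Int) + 1 - 1 = (i : Int) := by ring
        rw [e2] at h2
        rw [h2]
        congr 1
        rw [altGo_cons_space]
        simp only [runCont]
        by_cases hk : 1 ≤ spanSp rest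
        · rw [if_pos hk, if_pos hk]
          have e1 : (((i + 1 : Nat) : Int)) + (spanSp rest : Int) - 1 = (i : Int) + (spanSp rest : Int) := by
            push_cast; ring
          rw [e1]
        · rw [if_neg hk, if_neg hk]
      · -- S1: prev = i - 1, space: append i, go to S2
        intro hrb
        rw [goA_cons, if_space, if_pos (by ring : (i : Int) - 1 + 1 = (i : Int))]
        have h3 := ((ih (i + 1) rb).2.2) (by intro b hb; have := hrb b hb; push_cast; omega)
        push_cast at h3
        have e : ((i : Int) + 1 - 1) = (i : Int) := by ring
        rw [e] at h3
        have hrun : (runCont (' ' :: rest) i).reverse ++ rb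
            = (altGo (rest.drop (spanSp rest)) (i + 1 + spanSp rest)).reverse
              ++ ((i : Int) + (spanSp rest : Int)) :: rb := by
          simp only [runCont, spanSp_cons_space]
          rw [if_pos (by omega : 1 ≤ spanSp rest + 1), List.drop_succ_cons]
          have eA : i + (spanSp rest + 1) = i + 1 + spanSp rest := by omega
          have eV : (i : Int) + ((spanSp rest + 1 : Nat) : Int) - 1 = (i : Int) + (spanSp rest : Int) := by
            push_cast; ring
          rw [eA, eV, List.reverse_cons, List.append_assoc, List.singleton_append]
        rw [hrun]
        cases rb with
        | nil => exact h3
        | cons b rs =>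
          have hb : ¬ b = (i : Int) - 1 := by
            have := hrb b (by simp); omega
          simp only [if_neg hb]
          exact h3
      · -- S2: prev = i - 1, head bound = i - 1, space: increment head bound
        intro hrb
        rw [goA_cons_space_run_cons, if_pos (by ring : (i : Int) - 1 + 1 = (i : Int)), if_pos rfl]
        have e2 : (i : Int) - 1 + 1 = (i : Int) := by ring
        rw [e2]
        have h3 := ((ih (i + 1) rb).2.2) (by intro b hb; have := hrb b hb; push_cast; omega)
        push_cast at h3
        have e : ((i : Int) + 1 - 1) = (i : Int) := by ring
        rw [e] at h3
        rw [h3]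
        simp only [spanSp_cons_space, List.drop_succ_cons]
        have eA : i + (spanSp rest + 1) = i + 1 + spanSp rest := by omega
        have eV : (i : Int) - 1 + ((spanSp rest + 1 : Nat) : Int) = (i : Int) + (spanSp rest : Int) := by
          push_cast; ring
        rw [eA, eV]


    · -- non-space character: state unchanged (up to the S1/S2 → S0 relaxation)
      have hgo : ∀ prev rb', goA (c :: rest) (i : Int) prev rb' = goA rest ((i : Int) + 1) prev rb' := by
        intro prev rb'; rw [goA_cons, if_neg hc]
      refine ⟨?_, ?_, ?_⟩
      · intro hrb prev hprev
        rw [hgo]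
        have h1 := (ih (i + 1) rb).1 (by intro b hb; have := hrb b hb; push_cast; omega) prev (by push_cast; omega)
        push_cast at h1
        rw [h1, altGo_cons_nonspace c rest i hc]
      · intro hrb
        rw [hgo]
        have h1 := (ih (i + 1) rb).1 (by intro b hb; have := hrb b hb; push_cast; omega) ((i : Int) - 1) (by push_cast; omega)
        push_cast at h1
        rw [h1]
        simp only [runCont, spanSp_cons_nonspace c rest hc]
        rw [if_neg (by omega : ¬ 1 ≤ 0), altGo_cons_nonspace c rest i hc]
      · intro hrb
        rw [hgo]
        have h1 := (ih (i + 1) (((i : Int) - 1) :: rb)).1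
          (by
            intro b hb
            rcases List.mem_cons.mp hb with h | h
            · subst h; push_cast; omega
            · have := hrb b h; push_cast; omega)
          ((i : Int) - 1) (by push_cast; omega)
        push_cast at h1
        rw [h1]
        simp only [spanSp_cons_nonspace c rest hc, List.drop_zero, Nat.cast_zero, add_zero]
        rw [altGo_cons_nonspace c rest i hc]

-- ===== VERDICT (by name: the statement is the Claim_ definition above) =====
theorem mark_columns_py_spec : Claim_equal_mark_columns_py := by
  intro line _
  unfold Spec_mark_columns_py mark_columns_py mark_columns_py_alt
  rw [foldl_eq_goA]
  have h := ((goA_main line.toList 0 []).1) (by simp) (-100) (by norm_num)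
  simp only [Nat.cast_zero] at h
  rw [h]
  simp
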